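-- pv_equiv track=rewrite | github.com/yaswanth8008/DSA | Sorting/15. Max and Min Magic Number.py | solve
-- ===== SOURCE A (Python) =====
-- def solve(A):
--     A.sort()
--
--     max_magic_num = 0
--     min_magic_num = 0
--     i = 0
--     j = len(A) - 1
--     while i < j:
--         max_magic_num += abs(A[j] - A[i])
--         i += 1
--         j -= 1
--     i = 0
--     while i < len(A)-1:
--         min_magic_num += abs(A[i]-A[i+1])
--         i += 2
--     max_magic_num = max_magic_num %(10**9+7)
--     min_magic_num = min_magic_num %(10**9+7)
--     return [max_magic_num,min_magic_num]
-- ===== SOURCE B (Python) =====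
-- def solve(A):
--     A.sort()
--     n = len(A)
--     MOD = 10 ** 9 + 7
--     mx = 0
--     mn = 0
--     for k, v in enumerate(A):
--         d = 2 * k + 1
--         if d > n:
--             mx += v
--         elif d < n:
--             mx -= v
--         if k % 2:
--             mn += v
--         elif k + 1 < n:
--             mn -= v
--     return [mx % MOD, mn % MOD]
-- ===== Notes on version B (the rewrite author's own statement) =====
-- stated objective: alternative
-- what changed: Replaces A's two staged index-walking loops (a two-pointer walk from both ends plus a stride-2 adjacent-pair walk, both using abs) by a single enumerate pass that adds each sorted element once with sign coefficients determined by its index (+/-/0 for the max by whether 2k+1 exceeds or falls short of n, alternating signs with an unpaired-last exception for the min).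
import Mathlib
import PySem

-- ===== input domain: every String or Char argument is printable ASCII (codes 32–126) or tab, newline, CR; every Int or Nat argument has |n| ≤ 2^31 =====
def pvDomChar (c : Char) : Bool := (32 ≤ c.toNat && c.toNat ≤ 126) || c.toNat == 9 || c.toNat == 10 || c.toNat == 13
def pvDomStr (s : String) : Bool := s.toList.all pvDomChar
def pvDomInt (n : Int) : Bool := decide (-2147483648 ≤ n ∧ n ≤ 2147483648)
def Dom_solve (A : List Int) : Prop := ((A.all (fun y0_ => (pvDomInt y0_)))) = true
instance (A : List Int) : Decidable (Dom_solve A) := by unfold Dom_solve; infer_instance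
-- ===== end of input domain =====

-- B replaces A's two staged index-walking while loops (two-pointer + stride-2) by ONE
-- enumerate pass that adds each element with a sign coefficient determined by its index
-- (alternative decomposition, same cost; no abs, no two pointers).
-- A sorts its argument in place; the equivalence proved here is about the return value
-- (B performs the same sort/mutation in Python).

-- ===== PORT A =====
-- first while loop: two pointers i, j converging from the ends (indices always in range
-- when reached, so pyGetD's default is never used)
def pvMaxLoop (S : List Int) (i j : Int) : Int :=
  if i < j then
    |PySem.List.pyGetD S j 0 - PySem.List.pyGetD S i 0| + pvMaxLoop S (i + 1) (j - 1)
  else 0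
termination_by (j - i).toNat
decreasing_by omega

-- second while loop: i stepping by 2 while i < len(A) - 1
def pvMinLoop (S : List Int) (i : Int) : Int :=
  if i < (S.length : Int) - 1 then
    |PySem.List.pyGetD S i 0 - PySem.List.pyGetD S (i + 1) 0| + pvMinLoop S (i + 2)
  else 0
termination_by ((S.length : Int) - i).toNat
decreasing_by omega

def solve (A : List Int) : List Int :=
  let S := PySem.List.sorted A (fun x => x) false      -- A.sort()
  let max_magic_num := pvMaxLoop S 0 ((S.length : Int) - 1)
  let min_magic_num := pvMinLoop S 0
  [PySem.Int.mod max_magic_num (10 ^ 9 + 7), PySem.Int.mod min_magic_num (10 ^ 9 + 7)]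

-- ===== PORT B =====
-- one pass: for k, v in enumerate(A): d = 2*k+1; mx gets +v / -v / nothing according to
-- d > n / d < n; mn gets +v when k is odd, -v when k is even and not the unpaired last
def solve_alt (A : List Int) : List Int :=
  let S := PySem.List.sorted A (fun x => x) false      -- A.sort()
  let n : Int := (S.length : Int)
  let st := (PySem.List.enumerate S 0).foldl
    (fun (p : Int × Int) kv =>
      (if 2 * kv.1 + 1 > n then p.1 + kv.2
       else if 2 * kv.1 + 1 < n then p.1 - kv.2 else p.1,
       if PySem.Int.mod kv.1 2 ≠ 0 then p.2 + kv.2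
       else if kv.1 + 1 < n then p.2 - kv.2 else p.2))
    (0, 0)
  [PySem.Int.mod st.1 (10 ^ 9 + 7), PySem.Int.mod st.2 (10 ^ 9 + 7)]

-- ===== PRECONDITION & SPEC =====
def Spec_solve (A : List Int) (out : List Int) : Prop := out = solve_alt A
instance (A : List Int) (out : List Int) : Decidable (Spec_solve A out) := by unfold Spec_solve; infer_instance

-- ===== CLAIM (what is proved, stated in full; the proofs are below) =====
def Claim_equal_solve : Prop := ∀ (A : List Int), Dom_solve A → Spec_solve A (solve A)

-- ===== LEMMAS AND PROOFS =====

-- B's per-index contributions to mx and mn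
def pvFmax (n k v : Int) : Int :=
  if 2 * k + 1 > n then v else if 2 * k + 1 < n then -v else 0
def pvFmin (n k v : Int) : Int :=
  if PySem.Int.mod k 2 ≠ 0 then v else if k + 1 < n then -v else 0

-- sum of f over the index interval [a, b)
def pvISum (f : Nat → Int) (a b : Nat) : Int := ((List.range' a (b - a)).map f).sum

theorem pvISum_empty (f : Nat → Int) (a b : Nat) (h : b ≤ a) : pvISum f a b = 0 := by
  simp [pvISum, Nat.sub_eq_zero_of_le h]

theorem pvISum_cons (f : Nat → Int) (a b : Nat) (h : a < b) :
    pvISum f a b = f a + pvISum f (a + 1) b := by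
  unfold pvISum
  have : b - a = (b - (a + 1)) + 1 := by omega
  rw [this, List.range'_succ, List.map_cons, List.sum_cons]

theorem pvISum_concat (f : Nat → Int) (a b : Nat) (h : a ≤ b) :
    pvISum f a (b + 1) = pvISum f a b + f b := by
  unfold pvISum
  have h1 : b + 1 - a = (b - a) + 1 := by omega
  rw [h1, List.range'_concat, List.map_append, List.sum_append]
  have : a + (b - a) = b := by omega
  simp [this]

theorem pv_getD_mono (S : List Int) (hs : S.Pairwise (· ≤ ·)) (p q : Nat)
    (hpq : p ≤ q) (hq : q < S.length) : S.getD p 0 ≤ S.getD q 0 := by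
  rw [List.getD_eq_getElem _ _ (by omega), List.getD_eq_getElem _ _ hq]
  rcases Nat.eq_or_lt_of_le hpq with h | h
  · subst h; exact le_rfl
  · exact (List.pairwise_iff_getElem.mp hs) p q (by omega) hq h

theorem pv_mod_two (i : Nat) : PySem.Int.mod (i : Int) 2 = ((i % 2 : Nat) : Int) := by
  exact_mod_cast PySem.Int.mod_natCast i 2

-- splitting B's fold into the two coefficient sums
theorem pvFold_split (n : Int) (l : List (Int × Int)) :
    ∀ (a b : Int),
      l.foldl
        (fun (p : Int × Int) kv =>
          (if 2 * kv.1 + 1 > n then p.1 + kv.2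
           else if 2 * kv.1 + 1 < n then p.1 - kv.2 else p.1,
           if PySem.Int.mod kv.1 2 ≠ 0 then p.2 + kv.2
           else if kv.1 + 1 < n then p.2 - kv.2 else p.2)) (a, b)
      = (a + (l.map (fun kv => pvFmax n kv.1 kv.2)).sum,
         b + (l.map (fun kv => pvFmin n kv.1 kv.2)).sum) := by
  induction l with
  | nil => intro a b; simp
  | cons hd t ih =>
    intro a b
    simp only [List.foldl_cons, List.map_cons, List.sum_cons, ih]
    unfold pvFmax pvFmin
    rw [Prod.mk.injEq]
    exact ⟨by split_ifs <;> ring, by split_ifs <;> ring⟩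

-- the max coefficient sum over [i, j+1] with i + j = n - 1 is the two-pointer loop
theorem pvMaxSum_eq (S : List Int) (hs : S.Pairwise (· ≤ ·)) :
    ∀ (i j : Nat), i + j + 1 = S.length → i ≤ j + 1 →
      pvISum (fun k => pvFmax (S.length : Int) k (S.getD k 0)) i (j + 1)
        = pvMaxLoop S i j := by
  intro i j
  induction hk : j - i using Nat.strong_induction_on generalizing i j with
  | _ k ih =>
  intro hn hij
  rcases Nat.lt_trichotomy i j with hlt | heq | hgt
  · -- peel both ends
    have hj : j < S.length := by omega
    have h1 : pvISum (fun k => pvFmax (S.length : Int) k (S.getD k 0)) i (j + 1)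
        = pvFmax (S.length : Int) i (S.getD i 0)
          + (pvISum (fun k => pvFmax (S.length : Int) k (S.getD k 0)) (i + 1) j
             + pvFmax (S.length : Int) j (S.getD j 0)) := by
      rw [pvISum_cons _ _ _ (by omega)]
      have hj1 : j = (j - 1) + 1 := by omega
      rw [hj1, pvISum_concat _ _ _ (by omega)]
    have hFi : pvFmax (S.length : Int) i (S.getD i 0) = -(S.getD i 0) := by
      unfold pvFmax
      rw [if_neg (by omega), if_pos (by omega)]
    have hFj : pvFmax (S.length : Int) j (S.getD j 0) = S.getD j 0 := by
      unfold pvFmax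
      rw [if_pos (by omega)]
    rw [h1, hFi, hFj]
    rw [pvMaxLoop, if_pos (by exact_mod_cast hlt)]
    have hcast1 : ((i : Int) + 1) = (((i + 1 : Nat)) : Int) := by push_cast; ring
    have hcast2 : ((j : Int) - 1) = (((j - 1 : Nat)) : Int) := by
      push_cast [Nat.cast_sub (by omega : 1 ≤ j)]; ring
    rw [hcast1, hcast2,
        ← ih (j - 1 - (i + 1)) (by omega) (i + 1) (j - 1) rfl (by omega) (by omega)]
    rw [PySem.List.pyGetD_natCast, PySem.List.pyGetD_natCast]
    have habs : |S.getD j 0 - S.getD i 0| = S.getD j 0 - S.getD i 0 :=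
      abs_of_nonneg (by have := pv_getD_mono S hs i j (by omega) hj; omega)
    rw [habs, show j - 1 + 1 = j from by omega]
    ring
  · -- single middle element, coefficient 0 (n odd)
    subst heq
    rw [pvISum_cons _ _ _ (by omega), pvISum_empty _ _ _ (by omega)]
    have hF : pvFmax (S.length : Int) i (S.getD i 0) = 0 := by
      unfold pvFmax
      rw [if_neg (by omega), if_neg (by omega)]
    rw [hF, pvMaxLoop, if_neg (by omega)]
    ring
  · -- i = j + 1: empty interval (n even, pointers crossed)
    have : i = j + 1 := by omega
    rw [pvISum_empty _ _ _ (by omega), pvMaxLoop, if_neg (by omega)]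

-- the min coefficient sum over [i, n) at even i is the stride-2 loop
theorem pvMinSum_eq (S : List Int) (hs : S.Pairwise (· ≤ ·)) :
    ∀ (i : Nat), i % 2 = 0 →
      pvISum (fun k => pvFmin (S.length : Int) k (S.getD k 0)) i S.length
        = pvMinLoop S i := by
  intro i
  induction hk : S.length - i using Nat.strong_induction_on generalizing i with
  | _ k ih =>
  intro hev
  by_cases hlt : (i : Int) < (S.length : Int) - 1
  · have hi1 : i + 1 < S.length := by omega
    have h1 : pvISum (fun k => pvFmin (S.length : Int) k (S.getD k 0)) i S.length
        = pvFmin (S.length : Int) i (S.getD i 0)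
          + (pvFmin (S.length : Int) (i + 1) (S.getD (i + 1) 0)
             + pvISum (fun k => pvFmin (S.length : Int) k (S.getD k 0)) (i + 2) S.length) := by
      rw [pvISum_cons _ _ _ (by omega), pvISum_cons _ _ _ (by omega)]
      push_cast
      ring_nf
    have hFi : pvFmin (S.length : Int) i (S.getD i 0) = -(S.getD i 0) := by
      unfold pvFmin
      rw [if_neg (by rw [pv_mod_two]; omega), if_pos (by omega)]
    have hFi1 : pvFmin (S.length : Int) ((i : Int) + 1) (S.getD (i + 1) 0)
        = S.getD (i + 1) 0 := by
      unfold pvFmin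
      rw [show ((i : Int) + 1) = (((i + 1 : Nat)) : Int) from by push_cast; ring,
          if_pos (by rw [pv_mod_two]; omega)]
    rw [h1, hFi, hFi1]
    rw [pvMinLoop, if_pos hlt]
    have hcast : ((i : Int) + 2) = (((i + 2 : Nat)) : Int) := by push_cast; ring
    rw [hcast, ← ih (S.length - (i + 2)) (by omega) (i + 2) rfl (by omega)]
    rw [PySem.List.pyGetD_natCast,
        show ((i : Int) + 1) = (((i + 1 : Nat)) : Int) from by push_cast; ring,
        PySem.List.pyGetD_natCast]
    have habs : |S.getD i 0 - S.getD (i + 1) 0| = S.getD (i + 1) 0 - S.getD i 0 := by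
      rw [abs_sub_comm]
      exact abs_of_nonneg (by have := pv_getD_mono S hs i (i + 1) (by omega) hi1; omega)
    rw [habs]
    ring
  · rw [pvMinLoop, if_neg hlt]
    by_cases hge : S.length ≤ i
    · exact pvISum_empty _ _ _ hge
    · -- i = length - 1, single unpaired element, coefficient 0
      have hi : i + 1 = S.length := by omega
      rw [pvISum_cons _ _ _ (by omega), pvISum_empty _ _ _ (by omega)]
      have hF : pvFmin (S.length : Int) i (S.getD i 0) = 0 := by
        unfold pvFmin
        rw [if_neg (by rw [pv_mod_two]; omega), if_neg (by omega)]
      rw [hF]; ring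

theorem pv_sorted_pairwise (A : List Int) :
    (PySem.List.sorted A (fun x => x) false).Pairwise (· ≤ ·) := by
  have := PySem.List.sorted_pairwise A (fun x => x) (κ := Int)
  simpa using this

-- B's enumerate-fold sums equal the interval sums of the coefficient functions
theorem pvEnumSum_eq (S : List Int) (F : Int → Int → Int) :
    ((PySem.List.enumerate S 0).map (fun kv => F kv.1 kv.2)).sum
      = pvISum (fun k => F k (S.getD k 0)) 0 S.length := by
  rw [PySem.List.enumerate_eq_map_pyRange (d := 0), List.map_map,
      PySem.List.pyRange_one, List.map_map]
  simp only [PySem.List.len_eq, Int.sub_zero, Int.toNat_natCast]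
  unfold pvISum
  rw [Nat.sub_zero, ← List.range_eq_range']
  apply congrArg
  apply List.map_congr_left
  intro k hk
  have hk' : k < S.length := List.mem_range.mp hk
  simp only [Function.comp]
  rw [Int.zero_add, PySem.List.pyGetD_natCast, List.getD_eq_getElem?_getD]

-- ===== VERDICT (by name: the statement is the Claim_ definition above) =====
theorem solve_spec : Claim_equal_solve := by
  intro A _
  unfold Spec_solve solve solve_alt
  set S := PySem.List.sorted A (fun x => x) false with hS
  have hs := pv_sorted_pairwise A
  rw [← hS] at hs
  simp only []
  rw [pvFold_split]
  rw [pvEnumSum_eq S (fun k v => pvFmax (S.length : Int) k v),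
      pvEnumSum_eq S (fun k v => pvFmin (S.length : Int) k v)]
  have hmin : pvISum (fun k => pvFmin (S.length : Int) k (S.getD k 0)) 0 S.length
      = pvMinLoop S 0 := by
    have := pvMinSum_eq S hs 0 (by omega)
    simpa using this
  have hmax : pvISum (fun k => pvFmax (S.length : Int) k (S.getD k 0)) 0 S.length
      = pvMaxLoop S 0 ((S.length : Int) - 1) := by
    rcases Nat.eq_zero_or_pos S.length with h0 | hpos
    · rw [pvMaxLoop, if_neg (by omega), pvISum_empty _ _ _ (by omega)]
    · have h := pvMaxSum_eq S hs 0 (S.length - 1) (by omega) (by omega)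
      rw [show S.length - 1 + 1 = S.length from by omega] at h
      simp only [Nat.cast_zero] at h
      rw [h, show (((S.length - 1 : Nat)) : Int) = ((S.length : Int) - 1) from by
            push_cast [Nat.cast_sub (by omega : 1 ≤ S.length)]; ring]
  simp only [List.getD_eq_getElem?_getD] at hmax hmin
  simp [hmax, hmin]
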